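-- pv_equiv track=rewrite | github.com/jimmypuntoexe/prosvisio_assignment1 | Check_Functions.py | check_cognome
-- ===== SOURCE A (Python) =====
-- def check_cognome(cognome):
--     """Check if a surname is valid"""
--     if not cognome:
--         return False
--
--     for i in range(0, len(cognome)):
--         if (not (cognome[i] >= 'a' and cognome[i] <= 'z') \
--             and not (cognome[i] >= 'A' and cognome[i] <= 'Z') \
--             and not cognome[i] == ' '):
--             return False
--
--     return True
-- ===== SOURCE B (Python) =====
-- import re
--
-- _SURNAME_RE = re.compile(r'[a-zA-Z ]+')
--
-- def check_cognome(cognome):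
--     """Check if a surname is valid"""
--     return bool(cognome) and _SURNAME_RE.fullmatch(cognome) is not None
-- ===== Notes on version B (the rewrite author's own statement) =====
-- stated objective: idiomatic
-- what changed: Replaces the explicit index loop with per-character range comparisons by a single precompiled regular expression full-match over the class [a-zA-Z ]+, keeping the truthiness guard for the empty string.
import Mathlib
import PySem

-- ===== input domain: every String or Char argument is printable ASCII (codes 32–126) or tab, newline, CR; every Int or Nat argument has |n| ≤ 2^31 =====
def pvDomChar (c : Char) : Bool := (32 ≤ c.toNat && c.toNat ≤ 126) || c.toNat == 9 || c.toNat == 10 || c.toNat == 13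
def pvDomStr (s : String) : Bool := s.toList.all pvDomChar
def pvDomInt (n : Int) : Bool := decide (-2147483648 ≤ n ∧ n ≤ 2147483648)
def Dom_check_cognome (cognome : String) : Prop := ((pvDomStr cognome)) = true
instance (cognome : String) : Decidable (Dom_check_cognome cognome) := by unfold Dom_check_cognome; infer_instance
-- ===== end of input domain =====

-- B replaces A's index loop and per-character range tests by a single regex full-match
-- over [a-zA-Z ]+ (idiomatic); return values agree on all strings.

-- ===== PORT A =====
-- the body of A's for-loop over i in range(0, len(cognome)), reading cognome[i]:
-- early-returns false on the first character outside a-z / A-Z / ' '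
def checkLoopA (cs : List Char) : Bool :=
  match cs with
  | [] => true
  | c :: rest =>
      if (!(decide ('a' ≤ c) && decide (c ≤ 'z')))
         && (!(decide ('A' ≤ c) && decide (c ≤ 'Z')))
         && (!(c == ' ')) then
        false
      else
        checkLoopA rest

def check_cognome (cognome : String) : Bool :=
  if cognome.toList = [] then false   -- 'if not cognome'
  else checkLoopA cognome.toList

-- ===== PORT B =====
-- 'bool(cognome) and re.fullmatch(r"[a-zA-Z ]+", cognome) is not None':
-- fullmatch of the class-plus pattern = nonempty and every character in the class
def check_cognome_alt (cognome : String) : Bool :=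
  !(cognome.toList.isEmpty)
    && cognome.toList.all (fun c =>
        (decide ('a' ≤ c) && decide (c ≤ 'z'))
        || (decide ('A' ≤ c) && decide (c ≤ 'Z'))
        || c == ' ')

-- ===== PRECONDITION & SPEC =====
def Spec_check_cognome (cognome : String) (out : Bool) : Prop := out = check_cognome_alt cognome
instance (cognome : String) (out : Bool) : Decidable (Spec_check_cognome cognome out) := by unfold Spec_check_cognome; infer_instance

-- ===== CLAIM (what is proved, stated in full; the proofs are below) =====
def Claim_equal_check_cognome : Prop := ∀ (cognome : String), Dom_check_cognome cognome → Spec_check_cognome cognome (check_cognome cognome)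

-- ===== LEMMAS AND PROOFS =====
theorem checkLoopA_eq_all (cs : List Char) :
    checkLoopA cs = cs.all (fun c =>
        (decide ('a' ≤ c) && decide (c ≤ 'z'))
        || (decide ('A' ≤ c) && decide (c ≤ 'Z'))
        || c == ' ') := by
  induction cs with
  | nil => rfl
  | cons c rest ih =>
      simp only [checkLoopA, List.all_cons, ih]
      by_cases h1 : ('a' ≤ c ∧ c ≤ 'z')
      · simp [h1.1, h1.2]
      · by_cases h2 : ('A' ≤ c ∧ c ≤ 'Z')
        · simp [h2.1, h2.2]
        · by_cases h3 : c = ' '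
          · simp [h3]
          · rcases Decidable.not_and_iff_not_or_not.mp h1 with h | h <;>
            rcases Decidable.not_and_iff_not_or_not.mp h2 with g | g <;>
            simp [h, g, h3]

-- ===== VERDICT (by name: the statement is the Claim_ definition above) =====
theorem check_cognome_spec : Claim_equal_check_cognome := by
  intro cognome _
  unfold Spec_check_cognome check_cognome check_cognome_alt
  rcases h : cognome.toList with _ | ⟨c, rest⟩
  · simp [h]
  · simp [h, checkLoopA_eq_all]
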